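-- pv_equiv track=rewrite | github.com/YousifAlkhalaf/Python_CS | Finals/Credit Card.py | find_digit_sum
-- ===== SOURCE A (Python) =====
-- def find_digit_sum(num, step = 1, start = 0):
--     sum = 0
--     i = start
--     while num > 0:
--         digit = num % 10
--         if i % step == 0:
--             sum += digit
--         num //= 10
--         i += 1
--     return sum
-- ===== SOURCE B (Python) =====
-- def find_digit_sum(num, step=1, start=0):
--     if num <= 0:
--         return 0
--     m = abs(step)
--     i = (-start) % m
--     digits = []
--     while num > 0:
--         digits.append(num % 10)
--         num //= 10
--     total = 0
--     while i < len(digits):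
--         total += digits[i]
--         i += m
--     return total
-- ===== Notes on version B (the rewrite author's own statement) =====
-- stated objective: alternative
-- what changed: Instead of testing i % step == 0 on every digit while peeling, B materializes the digit list once, computes the offset (-start) % abs(step) of the first selected digit, and then sums by jumping abs(step) positions through the list with no per-digit condition.
import Mathlib
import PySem

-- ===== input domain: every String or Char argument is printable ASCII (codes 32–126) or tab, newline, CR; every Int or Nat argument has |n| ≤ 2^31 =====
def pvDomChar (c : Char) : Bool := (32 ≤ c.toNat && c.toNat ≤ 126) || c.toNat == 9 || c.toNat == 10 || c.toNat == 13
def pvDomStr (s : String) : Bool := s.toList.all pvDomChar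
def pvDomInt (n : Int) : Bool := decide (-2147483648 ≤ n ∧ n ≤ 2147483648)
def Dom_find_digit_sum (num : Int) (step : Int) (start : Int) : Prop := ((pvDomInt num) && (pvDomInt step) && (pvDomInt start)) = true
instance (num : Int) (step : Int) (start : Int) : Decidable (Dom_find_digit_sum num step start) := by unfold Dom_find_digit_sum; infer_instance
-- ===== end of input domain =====

-- B drops A's per-digit modular test: it materializes the digit list once, then sums by
-- jumping |step| positions from offset (-start) % |step| (alternative decomposition).

-- ===== PORT A =====
-- the while loop of A, state (num, i, sum); step is a fixed parameter
def findA_loop (step : Int) (num : Int) (i : Int) (sum : Int) : Int :=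
  if h : 0 < num then
    findA_loop step (PySem.Int.floordiv num 10) (i + 1)
      (if PySem.Int.mod i step = 0 then sum + PySem.Int.mod num 10 else sum)
  else sum
termination_by num.toNat
decreasing_by
  have h10 : PySem.Int.floordiv num 10 = num / 10 := PySem.Int.floordiv_eq_ediv_of_pos (by omega)
  have h1 : num / 10 < num := (Int.ediv_lt_iff_lt_mul (by omega)).2 (by nlinarith)
  have h2 : 0 ≤ num / 10 := Int.ediv_nonneg (by omega) (by omega)
  omega

def find_digit_sum (num : Int) (step : Int) (start : Int) : Int :=
  findA_loop step num start 0

-- ===== PORT B =====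
-- first loop of B: the digit list of num, least significant first
def digitsB (num : Int) : List Int :=
  if h : 0 < num then PySem.Int.mod num 10 :: digitsB (PySem.Int.floordiv num 10) else []
termination_by num.toNat
decreasing_by
  rw [PySem.Int.floordiv_eq_ediv_of_pos (by norm_num)]
  have h1 : num / 10 < num := (Int.ediv_lt_iff_lt_mul (by omega)).2 (by nlinarith)
  have h2 : 0 ≤ num / 10 := Int.ediv_nonneg (by omega) (by omega)
  omega

-- second loop of B, state (i, total); the '1 ≤ m' guard only makes the recursion total:
-- whenever B's Python reaches this loop it has m = abs(step) ≥ 1 (step = 0 with num > 0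
-- raises in Python before the loop and is excluded by Pre_).  i ≥ 0 in-spec, so the
-- pyGet?-with-default port of digits[i] is exact (the loop condition keeps i in range).
def sumIdxB (digits : List Int) (m : Int) (i : Int) (total : Int) : Int :=
  if h : i < (digits.length : Int) ∧ 1 ≤ m then
    sumIdxB digits m (i + m) (total + (PySem.List.pyGet? digits i).getD 0)
  else total
termination_by ((digits.length : Int) - i).toNat
decreasing_by omega

def find_digit_sum_alt (num : Int) (step : Int) (start : Int) : Int :=
  if num ≤ 0 then 0
  else
    let m := step.natAbs
    let i := PySem.Int.mod (-start) (m : Int)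
    sumIdxB (digitsB num) (m : Int) i 0

-- ===== PRECONDITION & SPEC =====
-- Pre_ excludes exactly the inputs where Python A raises ZeroDivisionError (step == 0 with num > 0).
def Pre_find_digit_sum (num : Int) (step : Int) (start : Int) : Prop := num ≤ 0 ∨ step ≠ 0
instance (num : Int) (step : Int) (start : Int) : Decidable (Pre_find_digit_sum num step start) := by
  unfold Pre_find_digit_sum; infer_instance

def pvWitness_find_digit_sum : Int × Int × Int := (123, 2, 0)

def Spec_find_digit_sum (num : Int) (step : Int) (start : Int) (out : Int) : Prop := out = find_digit_sum_alt num step start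
instance (num : Int) (step : Int) (start : Int) (out : Int) : Decidable (Spec_find_digit_sum num step start out) := by unfold Spec_find_digit_sum; infer_instance

-- ===== CLAIM (what is proved, stated in full; the proofs are below) =====
def Claim_equal_find_digit_sum : Prop := ∀ (num : Int) (step : Int) (start : Int), Dom_find_digit_sum num step start → Pre_find_digit_sum num step start → Spec_find_digit_sum num step start (find_digit_sum num step start)

-- ===== LEMMAS AND PROOFS =====

-- A's selection test i % step == 0 is sign-independent: it holds iff |step| divides i
lemma modA_eq_zero_iff (i step : Int) (hs : step ≠ 0) :
    PySem.Int.mod i step = 0 ↔ (-i) % (step.natAbs : Int) = 0 := by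
  rw [PySem.Int.mod_eq_zero_iff_dvd, ← Int.dvd_iff_emod_eq_zero, Int.dvd_neg, Int.natAbs_dvd]

-- how the offset (-i) % M evolves when i increases by one
lemma next_offset (i M : Int) (hM : 0 < M) :
    (-(i+1)) % M = if (-i) % M = 0 then M - 1 else (-i) % M - 1 := by
  have h1 := Int.mul_ediv_add_emod (-i) M
  have h2 := Int.mul_ediv_add_emod (-(i+1)) M
  have e1 : 0 ≤ (-i) % M := Int.emod_nonneg _ (ne_of_gt hM)
  have e2 : (-i) % M < M := Int.emod_lt_of_pos _ hM
  have e3 : 0 ≤ (-(i+1)) % M := Int.emod_nonneg _ (ne_of_gt hM)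
  have e4 : (-(i+1)) % M < M := Int.emod_lt_of_pos _ hM
  set q1 := (-i) / M
  set q2 := (-(i+1)) / M
  have hq' : M * (q2 - q1) = M * q2 - M * q1 := by ring
  have hq : M * (q2 - q1) = (-i) % M - (-(i+1)) % M - 1 := by omega
  have hc : q2 - q1 = 0 ∨ q2 - q1 = -1 := by
    have hub : M * (q2 - q1) < M * 1 := by omega
    have hlb : M * (-1) ≤ M * (q2 - q1) := by omega
    have c1 := Int.lt_of_mul_lt_mul_left hub (le_of_lt hM)
    have c2 := Int.le_of_mul_le_mul_left hlb hM
    omega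
  rcases hc with h | h <;> rw [h] at hq <;> split_ifs with h0 <;> omega

lemma pyGet?_cons_pos (d : Int) (l : List Int) (i : Int) (hi : 1 ≤ i) :
    PySem.List.pyGet? (d :: l) i = PySem.List.pyGet? l (i - 1) := by
  unfold PySem.List.pyGet? PySem.List.pyIdx?
  rw [if_pos (show (0:Int) ≤ i by omega), if_pos (show (0:Int) ≤ i - 1 by omega)]
  simp only [List.length_cons]
  by_cases hr : i - 1 < (l.length : Int)
  · rw [if_pos (by push_cast; omega), if_pos hr]
    simp only [Option.bind_some]
    have h3 : i.toNat = (i - 1).toNat + 1 := by omega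
    rw [h3, List.getElem?_cons_succ]
  · rw [if_neg (by push_cast; omega), if_neg hr]
    rfl

-- skipping the head of the digit list shifts the running index by one
lemma sumIdxB_shift (d : Int) (l : List Int) (M : Int) (hM : 1 ≤ M) :
    ∀ k i t, ((l.length : Int) + 1 - i).toNat ≤ k → 1 ≤ i →
      sumIdxB (d :: l) M i t = sumIdxB l M (i - 1) t := by
  intro k
  induction k with
  | zero =>
    intro i t hk hi
    conv_lhs => rw [sumIdxB]
    conv_rhs => rw [sumIdxB]
    rw [dif_neg (by rintro ⟨h1, -⟩; simp at h1; omega),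
        dif_neg (by rintro ⟨h1, -⟩; omega)]
  | succ k ih =>
    intro i t hk hi
    by_cases hin : i < (l.length : Int) + 1
    · conv_lhs => rw [sumIdxB]
      conv_rhs => rw [sumIdxB]
      rw [dif_pos (show _ ∧ _ from ⟨by simp; omega, hM⟩),
          dif_pos (show _ ∧ _ from ⟨by omega, hM⟩),
          pyGet?_cons_pos d l i hi,
          ih (i + M) (t + (PySem.List.pyGet? l (i - 1)).getD 0) (by omega) (by omega)]
      congr 1
      omega
    · conv_lhs => rw [sumIdxB]
      conv_rhs => rw [sumIdxB]
      rw [dif_neg (by rintro ⟨h1, -⟩; simp at h1; omega),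
          dif_neg (by rintro ⟨h1, -⟩; omega)]

-- main invariant: A's loop from state (n, i, s) equals B's index loop over the digit
-- list of n started at offset (-i) % M, where M = |step|
lemma key (step : Int) (hs : step ≠ 0) :
    ∀ k, ∀ n : Int, n.toNat ≤ k → ∀ i s,
      findA_loop step n i s =
        sumIdxB (digitsB n) (step.natAbs : Int) ((-i) % (step.natAbs : Int)) s := by
  have hM : (0:Int) < (step.natAbs : Int) := by
    exact_mod_cast Int.natAbs_pos.mpr hs
  intro k
  induction k with
  | zero =>
    intro n hn i s
    have e1 : 0 ≤ (-i) % (step.natAbs : Int) := Int.emod_nonneg _ (ne_of_gt hM)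
    rw [findA_loop, dif_neg (show ¬ 0 < n by omega),
        digitsB, dif_neg (show ¬ 0 < n by omega),
        sumIdxB, dif_neg (by rintro ⟨h1, -⟩; simp only [List.length_nil, Nat.cast_zero] at h1; omega)]
  | succ k ih =>
    intro n hn i s
    by_cases hpos : 0 < n
    · set M : Int := (step.natAbs : Int) with hMdef
      have e1 : 0 ≤ (-i) % M := Int.emod_nonneg _ (ne_of_gt hM)
      have e2 : (-i) % M < M := Int.emod_lt_of_pos _ hM
      have hA : findA_loop step n i s =
          findA_loop step (PySem.Int.floordiv n 10) (i + 1)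
            (if PySem.Int.mod i step = 0 then s + PySem.Int.mod n 10 else s) := by
        rw [findA_loop]; simp [hpos]
      have hdec : (PySem.Int.floordiv n 10).toNat ≤ k := by
        rw [PySem.Int.floordiv_eq_ediv_of_pos (by norm_num)]
        have h1 : n / 10 < n := (Int.ediv_lt_iff_lt_mul (by omega)).2 (by nlinarith)
        have h2 : 0 ≤ n / 10 := Int.ediv_nonneg (by omega) (by omega)
        omega
      have hIH := ih (PySem.Int.floordiv n 10) hdec (i + 1)
      have hnext := next_offset i M hM
      have hdig : digitsB n = PySem.Int.mod n 10 :: digitsB (PySem.Int.floordiv n 10) := by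
        rw [digitsB, dif_pos hpos]
      set rest := digitsB (PySem.Int.floordiv n 10) with hrest
      by_cases h0 : (-i) % M = 0
      · -- digit selected: both sides add n % 10 before moving on
        have hcond : PySem.Int.mod i step = 0 := (modA_eq_zero_iff i step hs).mpr h0
        have hget : PySem.List.pyGet? (PySem.Int.mod n 10 :: rest) 0 = some (PySem.Int.mod n 10) := by
          simp [PySem.List.pyGet?, PySem.List.pyIdx?]
        rw [hA, if_pos hcond, hIH, hdig, hnext, if_pos h0, h0]
        conv_rhs => rw [sumIdxB]
        rw [dif_pos (And.intro (show (0:Int) < ((PySem.Int.mod n 10 :: rest).length : Int) by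
              simp only [List.length_cons]; push_cast; omega) (by omega)), hget]
        simp only [Option.getD_some]
        rw [sumIdxB_shift _ _ _ (by omega) ((rest.length : Int) + 1 - (0 + M)).toNat
            (0 + M) _ le_rfl (by omega)]
        congr 1
        omega
      · -- digit skipped: B's index just walks one position into the list
        have hcond : ¬ PySem.Int.mod i step = 0 := fun hc => h0 ((modA_eq_zero_iff i step hs).mp hc)
        rw [hA, if_neg hcond, hIH, hdig, hnext, if_neg h0]
        rw [sumIdxB_shift _ _ _ (by omega) ((rest.length : Int) + 1 - (-i) % M).toNat
            ((-i) % M) _ le_rfl (by omega)]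
    · -- num already exhausted: both loops stop
      have e1 : 0 ≤ (-i) % (step.natAbs : Int) := Int.emod_nonneg _ (ne_of_gt hM)
      rw [findA_loop, dif_neg hpos, digitsB, dif_neg hpos,
          sumIdxB, dif_neg (by rintro ⟨h1, -⟩; simp only [List.length_nil, Nat.cast_zero] at h1; omega)]

-- ===== VERDICT (by name: the statement is the Claim_ definition above) =====
theorem find_digit_sum_spec : Claim_equal_find_digit_sum := by
  intro num step start _ hpre
  unfold Spec_find_digit_sum find_digit_sum find_digit_sum_alt
  by_cases h0 : num ≤ 0
  · rw [findA_loop, dif_neg (show ¬ 0 < num by omega), if_pos h0]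
  · have hs : step ≠ 0 := hpre.resolve_left h0
    have hM : (0:Int) < (step.natAbs : Int) := by exact_mod_cast Int.natAbs_pos.mpr hs
    rw [if_neg h0]
    simp only
    rw [PySem.Int.mod_eq_emod_of_pos hM]
    exact key step hs num.toNat num le_rfl start 0
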